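-- pv_equiv track=rewrite | github.com/lj05117/algorithm | Programmers/plus_yin_yang.py | solution
-- ===== SOURCE A (Python) =====
-- def solution(absolutes, signs):
--     answer = 0
--     while(absolutes):
--         if signs[0]==True:
--             answer+=absolutes[0]
--         else:answer-=absolutes[0]
--         del absolutes[0]
--         del signs[0]
--     return answer
-- ===== SOURCE B (Python) =====
-- def solution(absolutes, signs):
--     return sum(a if signs[i] else -a for i, a in enumerate(absolutes))
-- ===== Notes on version B (the rewrite author's own statement) =====
-- stated objective: faster
-- what changed: replaces the destructive while-loop that repeatedly deletes the front of both lists (O(n^2) list shifting, and it mutates the caller's lists) with a single non-mutating indexed pass over enumerate(absolutes)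
import Mathlib
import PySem

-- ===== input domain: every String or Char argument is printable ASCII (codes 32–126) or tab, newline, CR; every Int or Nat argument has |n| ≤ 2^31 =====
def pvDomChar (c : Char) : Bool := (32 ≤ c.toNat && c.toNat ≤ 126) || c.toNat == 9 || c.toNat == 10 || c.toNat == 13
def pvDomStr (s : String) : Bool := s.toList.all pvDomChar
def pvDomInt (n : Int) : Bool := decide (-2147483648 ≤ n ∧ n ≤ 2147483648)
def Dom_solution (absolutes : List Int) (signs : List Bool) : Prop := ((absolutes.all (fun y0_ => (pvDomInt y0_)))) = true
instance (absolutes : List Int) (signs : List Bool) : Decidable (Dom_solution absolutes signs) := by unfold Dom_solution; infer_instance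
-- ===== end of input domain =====

-- ===== PORT A =====
-- B: one non-mutating indexed pass over enumerate(absolutes) instead of A's destructive while-loop.
-- A mutates its arguments in place (empties both lists); the equivalence here is about the return value only.
-- While-loop of A: consume the head of both lists, accumulating into `answer`.
def solutionLoopA (answer : Int) : List Int → List Bool → Int
  | [], _ => answer
  | a :: as, ss =>
      match ss with
      | [] => answer  -- Python raises IndexError here; excluded by Pre_solution
      | s :: ss' => solutionLoopA (if s = true then answer + a else answer - a) as ss'

def solution (absolutes : List Int) (signs : List Bool) : Int :=
  solutionLoopA 0 absolutes signs

-- ===== PORT B =====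
def solution_alt (absolutes : List Int) (signs : List Bool) : Int :=
  (PySem.List.enumerate absolutes).foldl
    (fun acc p => acc + (if PySem.List.pyGetD signs p.1 false then p.2 else -p.2)) 0

-- ===== PRECONDITION & SPEC =====
-- Pre_ excludes inputs where signs is shorter than absolutes: Python A raises IndexError there (and so does B).
def Pre_solution (absolutes : List Int) (signs : List Bool) : Prop :=
  absolutes.length ≤ signs.length
instance (absolutes : List Int) (signs : List Bool) : Decidable (Pre_solution absolutes signs) := by
  unfold Pre_solution; infer_instance
def pvWitness_solution : List Int × List Bool := ([4, 7, 12], [true, false, true])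

def Spec_solution (absolutes : List Int) (signs : List Bool) (out : Int) : Prop := out = solution_alt absolutes signs
instance (absolutes : List Int) (signs : List Bool) (out : Int) : Decidable (Spec_solution absolutes signs out) := by unfold Spec_solution; infer_instance

-- ===== CLAIM =====
def Claim_equal_solution : Prop := ∀ (absolutes : List Int) (signs : List Bool), Dom_solution absolutes signs → Pre_solution absolutes signs → Spec_solution absolutes signs (solution absolutes signs)

-- ===== LEMMAS AND PROOFS =====
theorem solutionLoopA_eq_foldl (as : List Int) :
    ∀ (pre ss : List Bool) (ans : Int), as.length ≤ ss.length →
      solutionLoopA ans as ss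
        = (PySem.List.enumerate as (pre.length : Int)).foldl
            (fun acc p => acc + (if PySem.List.pyGetD (pre ++ ss) p.1 false then p.2 else -p.2)) ans := by
  induction as with
  | nil => intro pre ss ans _; simp [solutionLoopA, PySem.List.enumerate_nil]
  | cons a as ih =>
      intro pre ss ans h
      cases ss with
      | nil => simp at h
      | cons s ss' =>
          rw [PySem.List.enumerate_cons, List.foldl_cons]
          have hidx : PySem.List.pyGetD (pre ++ s :: ss') (pre.length : Int) false = s := by
            rw [PySem.List.pyGetD_natCast]
            simp [List.getD]
          rw [hidx]
          have := ih (pre ++ [s]) ss' (if s = true then ans + a else ans - a) (by simpa using h)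
          simp only [List.length_append, List.length_singleton, List.append_assoc,
            List.singleton_append, Nat.cast_add, Nat.cast_one] at this
          rw [solutionLoopA, this]
          congr 1
          cases s <;> simp <;> ring_nf

-- ===== VERDICT =====
theorem solution_spec : Claim_equal_solution := by
  intro absolutes signs _ hpre
  unfold Spec_solution solution solution_alt
  have := solutionLoopA_eq_foldl absolutes [] signs 0 hpre
  simpa using this
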